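-- pv_equiv track=rewrite | github.com/rishabhc9/CharEncoding-Python-Library | __init__.py | encode_base91
-- ===== SOURCE A (Python) =====
-- def encode_base91(string):
--
--     characters = 'ABCDEFGHIJKLMNOPQRSTUVWXYZabcdefghijklmnopqrstuvwxyz0123456789!#$%&()*+,./:;<=>?@[]^_`{|}~"'
--
--     binary_string = ''.join(format(ord(char), '08b') for char in string)
--     while len(binary_string) % 13 != 0:
--         binary_string += '0'
--
--     encoded_string = ''
--     for i in range(0, len(binary_string), 13):
--         chunk = binary_string[i:i+13]
--         index = int(chunk, 2)
--         quotient, remainder = divmod(index, 91*91)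
--         encoded_string += characters[quotient] + characters[remainder // 91] + characters[remainder % 91]
--
--     return encoded_string
-- ===== SOURCE B (Python) =====
-- def encode_base91(string):
--     characters = 'ABCDEFGHIJKLMNOPQRSTUVWXYZabcdefghijklmnopqrstuvwxyz0123456789!#$%&()*+,./:;<=>?@[]^_`{|}~"'
--     out = []
--     acc = 0
--     nbits = 0
--     for ch in string:
--         acc = (acc << 8) + ord(ch)
--         nbits += 8
--         while nbits >= 13:
--             nbits -= 13
--             value, acc = divmod(acc, 1 << nbits)
--             out.append(characters[value // 8281] + characters[value // 91 % 91] + characters[value % 91])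
--     if nbits:
--         value = acc << (13 - nbits)
--         out.append(characters[value // 8281] + characters[value // 91 % 91] + characters[value % 91])
--     return ''.join(out)
-- ===== Notes on version B (the rewrite author's own statement) =====
-- stated objective: alternative
-- what changed: B streams the bits through an integer accumulator (shift in 8 bits per character, extract 13-bit groups arithmetically, pad once at the end), instead of A's building of a '0'/'1' binary string, padding it character by character, and re-parsing 13-character slices with int(_, 2).
import Mathlib
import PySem

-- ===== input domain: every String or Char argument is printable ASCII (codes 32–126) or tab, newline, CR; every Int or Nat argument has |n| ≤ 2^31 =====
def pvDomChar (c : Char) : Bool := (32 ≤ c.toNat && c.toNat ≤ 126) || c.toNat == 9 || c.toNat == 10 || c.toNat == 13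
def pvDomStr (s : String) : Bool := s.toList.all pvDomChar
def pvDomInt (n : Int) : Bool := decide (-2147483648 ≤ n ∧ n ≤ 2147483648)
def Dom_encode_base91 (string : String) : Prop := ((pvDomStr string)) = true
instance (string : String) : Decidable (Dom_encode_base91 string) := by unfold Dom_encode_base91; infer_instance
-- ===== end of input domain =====

-- B replaces A's padded binary-string construction and 13-character slicing with a streaming
-- integer bit accumulator (alternative algorithm, same output).

-- ===== PORT A =====
-- the 91-character alphabet; indexing characters[i] is ported as getD (every index used is < 91, proven below)
def pvCharsA : List Char :=
  "ABCDEFGHIJKLMNOPQRSTUVWXYZabcdefghijklmnopqrstuvwxyz0123456789!#$%&()*+,./:;<=>?@[]^_`{|}~\"".toList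

def pvCharAt (i : Nat) : Char := pvCharsA.getD i 'A'

-- format(ord(char), '08b'): w-width binary, MSB first; exact for ord < 2^w (here ord < 256 on Dom)
def pvBits (w n : Nat) : List Char :=
  match w with
  | 0 => []
  | w + 1 => pvBits w (n / 2) ++ [if n % 2 = 1 then '1' else '0']

-- the while-padding loop of A: append '0' until length % 13 == 0
-- (fuel makes the loop structural; it is called with fuel 13, enough for the at most 12 appended zeros)
def pvPad (fuel : Nat) (l : List Char) : List Char :=
  match fuel with
  | 0 => l
  | f + 1 => if l.length % 13 = 0 then l else pvPad f (l ++ ['0'])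

-- int(chunk, 2): exact for strings of '0'/'1' characters
def pvBinVal (l : List Char) : Nat :=
  l.foldl (fun a c => 2 * a + (if c = '1' then 1 else 0)) 0

-- the for-loop over range(0, len, 13); s[i:i+13] = (drop i).take 13 for i ≥ 0 (exact)
-- (fuel makes the loop structural; it is called with fuel padded.length + 1, enough for all iterations)
def pvLoopA (fuel : Nat) (padded : List Char) (i : Nat) (out : String) : String :=
  match fuel with
  | 0 => out
  | f + 1 =>
    if i < padded.length then
      let chunk := (padded.drop i).take 13
      let index := pvBinVal chunk
      let q := index / (91 * 91)
      let r := index % (91 * 91)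
      pvLoopA f padded (i + 13) (out ++ String.mk [pvCharAt q, pvCharAt (r / 91), pvCharAt (r % 91)])
    else out

def encode_base91 (string : String) : String :=
  let binary := string.toList.flatMap (fun c => pvBits 8 c.toNat)
  let padded := pvPad 13 binary
  pvLoopA (padded.length + 1) padded 0 ""

-- ===== PORT B =====
-- emit one triple for a 13-bit value (Source B's out.append line)
def pvEmitB (v : Nat) : String :=
  String.mk [pvCharAt (v / 8281), pvCharAt (v / 91 % 91), pvCharAt (v % 91)]

-- the inner while-loop of Source B: extract 13-bit groups while nbits >= 13
-- (fuel makes the loop structural; it is called with fuel nbits, enough for all iterations)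
def pvDrain (fuel acc nbits : Nat) (out : String) : Nat × Nat × String :=
  match fuel with
  | 0 => (acc, nbits, out)
  | f + 1 =>
    if 13 ≤ nbits then
      pvDrain f (acc % (1 <<< (nbits - 13))) (nbits - 13) (out ++ pvEmitB (acc / (1 <<< (nbits - 13))))
    else (acc, nbits, out)

-- one iteration of Source B's for-loop body
def pvStep (st : Nat × Nat × String) (c : Char) : Nat × Nat × String :=
  pvDrain (st.2.1 + 8) ((st.1 <<< 8) + c.toNat) (st.2.1 + 8) st.2.2

-- ''.join of the appended pieces is ported as direct String concatenation (exact)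
def encode_base91_alt (string : String) : String :=
  let st := string.toList.foldl pvStep (0, 0, "")
  if st.2.1 ≠ 0 then st.2.2 ++ pvEmitB (st.1 <<< (13 - st.2.1)) else st.2.2

-- ===== PRECONDITION & SPEC =====
def Spec_encode_base91 (string : String) (out : String) : Prop := out = encode_base91_alt string
instance (string : String) (out : String) : Decidable (Spec_encode_base91 string out) := by unfold Spec_encode_base91; infer_instance

-- ===== CLAIM (what is proved, stated in full; the proofs are below) =====
def Claim_equal_encode_base91 : Prop := ∀ (string : String), Dom_encode_base91 string → Spec_encode_base91 string (encode_base91 string)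

-- ===== LEMMAS AND PROOFS =====

-- A's emit formula, as a function of the chunk value
def pvEmitA (v : Nat) : String :=
  String.mk [pvCharAt (v / (91 * 91)), pvCharAt (v % (91 * 91) / 91), pvCharAt (v % (91 * 91) % 91)]

-- B's finalization step (the trailing `if nbits:` of Source B)
def pvFinish (st : Nat × Nat × String) : String :=
  if st.2.1 ≠ 0 then st.2.2 ++ pvEmitB (st.1 <<< (13 - st.2.1)) else st.2.2

-- structural reference: encode a bit list in 13-bit chunks
def pvChunks (l : List Char) : String :=
  if h : l = [] then "" else pvEmitA (pvBinVal (l.take 13)) ++ pvChunks (l.drop 13)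
termination_by l.length
decreasing_by cases l with | nil => simp at h | cons a t => simp [List.length_drop]

theorem pvEmit_eq (v : Nat) (h : v < 8192) : pvEmitB v = pvEmitA v := by
  unfold pvEmitB pvEmitA
  have e0 : (91 * 91 : Nat) = 8281 := by norm_num
  rw [e0]
  have e1 : v % 8281 = v := by omega
  have e2 : v / 91 % 91 = v / 91 := by omega
  rw [e1, e2]

theorem pvBinVal_foldl (l : List Char) (i : Nat) :
    l.foldl (fun a c => 2 * a + (if c = '1' then 1 else 0)) i = i * 2 ^ l.length + pvBinVal l := by
  induction l generalizing i with
  | nil => simp [pvBinVal]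
  | cons c t ih =>
    simp only [List.foldl_cons, List.length_cons, pvBinVal]
    rw [ih, ih (2 * 0 + _)]
    ring_nf

theorem pvBinVal_cons (c : Char) (t : List Char) :
    pvBinVal (c :: t) = (if c = '1' then 1 else 0) * 2 ^ t.length + pvBinVal t := by
  unfold pvBinVal
  simp only [List.foldl_cons]
  rw [pvBinVal_foldl]
  unfold pvBinVal
  split_ifs <;> ring

theorem pvBinVal_append (a b : List Char) :
    pvBinVal (a ++ b) = pvBinVal a * 2 ^ b.length + pvBinVal b := by
  unfold pvBinVal
  rw [List.foldl_append, pvBinVal_foldl]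
  rfl

theorem pvBinVal_lt (l : List Char) : pvBinVal l < 2 ^ l.length := by
  induction l with
  | nil => simp [pvBinVal]
  | cons c t ih =>
    rw [pvBinVal_cons]
    simp only [List.length_cons, pow_succ]
    split_ifs <;> omega

theorem pvBits_length (w n : Nat) : (pvBits w n).length = w := by
  induction w generalizing n with
  | zero => rfl
  | succ w ih => simp [pvBits, ih]

theorem pvBits_val (w n : Nat) (h : n < 2 ^ w) : pvBinVal (pvBits w n) = n := by
  induction w generalizing n with
  | zero =>
    have h0 : n = 0 := by simp only [pow_zero] at h; omega
    subst h0; rfl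
  | succ w ih =>
    show pvBinVal (pvBits w (n / 2) ++ [if n % 2 = 1 then '1' else '0']) = n
    rw [pvBinVal_append, ih (n / 2) (by rw [pow_succ] at h; omega)]
    have hb : pvBinVal [if n % 2 = 1 then '1' else '0'] = n % 2 := by
      rcases Nat.mod_two_eq_zero_or_one n with h2 | h2 <;> simp [pvBinVal, h2]
    rw [hb]
    have hl : (([if n % 2 = 1 then '1' else '0'] : List Char)).length = 1 := by
      rcases Nat.mod_two_eq_zero_or_one n with h2 | h2 <;> simp [h2]
    rw [hl, pow_one]
    omega

theorem pvRepVal (k : Nat) : pvBinVal (List.replicate k '0') = 0 := by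
  induction k with
  | zero => rfl
  | succ k ih =>
    rw [List.replicate_succ, pvBinVal_cons, ih, if_neg (by decide : ¬ ('0' : Char) = '1')]
    simp

-- pad closed form (for any sufficient fuel)
theorem pvPad_eq (f : Nat) : ∀ (l : List Char), (13 - l.length % 13) % 13 ≤ f →
    pvPad f l = l ++ List.replicate ((13 - l.length % 13) % 13) '0' := by
  induction f with
  | zero =>
    intro l h
    have h0 : (13 - l.length % 13) % 13 = 0 := by omega
    rw [h0]
    simp [pvPad]
  | succ f ih =>
    intro l h
    by_cases h0 : l.length % 13 = 0
    · have hc : (13 - l.length % 13) % 13 = 0 := by omega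
      rw [hc, pvPad, if_pos h0]
      simp
    · rw [pvPad, if_neg h0, ih (l ++ ['0']) (by simp only [List.length_append, List.length_singleton]; omega),
        List.append_assoc]
      congr 1
      rw [List.singleton_append, ← List.replicate_succ]
      congr 1
      simp only [List.length_append, List.length_singleton]
      omega

-- step equations for the recursive definitions
theorem pvChunks_nil : pvChunks [] = "" := by rw [pvChunks]; simp

theorem pvChunks_cons (l : List Char) (h : l ≠ []) :
    pvChunks l = pvEmitA (pvBinVal (l.take 13)) ++ pvChunks (l.drop 13) := by
  conv_lhs => rw [pvChunks]
  rw [dif_neg h]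

theorem pvChunks_block (c rest : List Char) (h : c.length = 13) :
    pvChunks (c ++ rest) = pvEmitA (pvBinVal c) ++ pvChunks rest := by
  have hne : c ++ rest ≠ [] := by
    intro he; apply_fun List.length at he; simp [h] at he
  rw [pvChunks_cons _ hne]
  rw [show (13 : Nat) = c.length from h.symm, List.take_left, List.drop_left]

theorem pvDrain_pos (f acc nbits : Nat) (out : String) (h : 13 ≤ nbits) :
    pvDrain (f + 1) acc nbits out =
      pvDrain f (acc % (1 <<< (nbits - 13))) (nbits - 13) (out ++ pvEmitB (acc / (1 <<< (nbits - 13)))) := by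
  rw [pvDrain, if_pos h]

theorem pvDrain_neg (f acc nbits : Nat) (out : String) (h : ¬ 13 ≤ nbits) :
    pvDrain f acc nbits out = (acc, nbits, out) := by
  cases f with
  | zero => rfl
  | succ f => rw [pvDrain, if_neg h]

theorem pvFinish_pos (a n : Nat) (o : String) (h : n ≠ 0) :
    pvFinish (a, n, o) = o ++ pvEmitB (a <<< (13 - n)) := by
  unfold pvFinish; simp [h]

theorem pvFinish_zero (a : Nat) (o : String) : pvFinish (a, 0, o) = o := by
  unfold pvFinish; simp

-- A's slice loop equals the structural chunk recursion (for any sufficient fuel)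
theorem pvLoopA_eq (l : List Char) : ∀ (f i : Nat) (out : String), l.length ≤ i + 13 * f →
    pvLoopA f l i out = out ++ pvChunks (l.drop i) := by
  intro f
  induction f with
  | zero =>
    intro i out h
    rw [show pvLoopA 0 l i out = out from rfl, List.drop_eq_nil_of_le (by omega), pvChunks_nil,
      String.append_empty]
  | succ f ihf =>
    intro i out h
    show (if i < l.length then
        pvLoopA f l (i + 13) (out ++ pvEmitA (pvBinVal ((l.drop i).take 13))) else out) =
      out ++ pvChunks (l.drop i)
    by_cases hi : i < l.length
    · have hd : l.drop i ≠ [] := by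
        have hlen : (l.drop i).length ≠ 0 := by simp only [List.length_drop]; omega
        intro he; rw [he] at hlen; simp at hlen
      rw [if_pos hi, ihf (i + 13) _ (by omega), pvChunks_cons (l.drop i) hd,
        List.drop_drop, String.append_assoc]
    · rw [if_neg hi, List.drop_eq_nil_of_le (by omega), pvChunks_nil, String.append_empty]

-- value/remainder extraction of the top 13 bits
theorem pvSplit13 (L : List Char) (h : 13 ≤ L.length) :
    pvBinVal L / 2 ^ (L.length - 13) = pvBinVal (L.take 13) ∧
    pvBinVal L % 2 ^ (L.length - 13) = pvBinVal (L.drop 13) := by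
  have e : pvBinVal L = pvBinVal (L.take 13) * 2 ^ (L.drop 13).length + pvBinVal (L.drop 13) := by
    conv_lhs => rw [← List.take_append_drop 13 L]
    exact pvBinVal_append _ _
  have hy := pvBinVal_lt (L.drop 13)
  have hx : L.length - 13 = (L.drop 13).length := by simp
  rw [hx, e]
  constructor
  · rw [Nat.mul_comm, Nat.mul_add_div (Nat.two_pow_pos _), Nat.div_eq_of_lt hy, Nat.add_zero]
  · rw [Nat.mul_comm, Nat.mul_add_mod, Nat.mod_eq_of_lt hy]

-- cutting one 13-bit block off the front commutes with padding
theorem pvPad_cut (L f : List Char) (h13 : 13 ≤ L.length) :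
    pvChunks (pvPad 13 (L ++ f)) = pvEmitA (pvBinVal (L.take 13)) ++ pvChunks (pvPad 13 (L.drop 13 ++ f)) := by
  rw [pvPad_eq 13 _ (by omega), pvPad_eq 13 _ (by omega)]
  have hp : ((13 - ((L.drop 13 ++ f).length) % 13) % 13) = ((13 - ((L ++ f).length) % 13) % 13) := by
    simp only [List.length_append, List.length_drop]; omega
  rw [hp]
  generalize ((13 - ((L ++ f).length) % 13) % 13) = K
  have htk : (L.take 13).length = 13 := by simp only [List.length_take]; omega
  simp only [List.append_assoc]
  conv_lhs => rw [← List.take_append_drop 13 L]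
  simp only [List.append_assoc]
  rw [pvChunks_block _ _ htk]

-- main invariant for B's fold: the accumulator holds exactly the not-yet-emitted bits
theorem pvFold_inv : ∀ (cs : List Char), (∀ c ∈ cs, c.toNat < 256) →
    ∀ (rem : List Char) (out : String), rem.length < 13 →
    pvFinish (cs.foldl pvStep (pvBinVal rem, rem.length, out)) =
      out ++ pvChunks (pvPad 13 (rem ++ cs.flatMap (fun c => pvBits 8 c.toNat))) := by
  intro cs
  induction cs with
  | nil =>
    intro _ rem out hr
    simp only [List.foldl_nil, List.flatMap_nil, List.append_nil]
    by_cases hrem : rem = []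
    · subst hrem
      rw [show pvBinVal [] = 0 from rfl, show ([] : List Char).length = 0 from rfl, pvFinish_zero,
        show pvPad 13 ([] : List Char) = [] from rfl, pvChunks_nil, String.append_empty]
    · have h0 : rem.length ≠ 0 := by
        cases rem with | nil => exact absurd rfl hrem | cons a t => simp
      rw [pvFinish_pos _ _ _ h0, pvPad_eq 13 rem (by omega)]
      have hm : (13 - rem.length % 13) % 13 = 13 - rem.length := by omega
      rw [hm]
      have hlen : (rem ++ List.replicate (13 - rem.length) '0').length = 13 := by
        simp; omega
      have block := pvChunks_block (rem ++ List.replicate (13 - rem.length) '0') [] hlen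
      rw [List.append_nil] at block
      rw [block, pvChunks_nil, String.append_empty]
      have hv : pvBinVal (rem ++ List.replicate (13 - rem.length) '0')
          = pvBinVal rem * 2 ^ (13 - rem.length) := by
        rw [pvBinVal_append, pvRepVal, List.length_replicate, Nat.add_zero]
      rw [hv, Nat.shiftLeft_eq, pvEmit_eq]
      have h1 := pvBinVal_lt rem
      have h2 : pvBinVal rem * 2 ^ (13 - rem.length) < 2 ^ rem.length * 2 ^ (13 - rem.length) :=
        mul_lt_mul_of_pos_right h1 (Nat.two_pow_pos _)
      have h3 : 2 ^ rem.length * 2 ^ (13 - rem.length) = 2 ^ 13 := by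
        rw [← pow_add]; congr 1; omega
      have h4 : (2 : Nat) ^ 13 = 8192 := by norm_num
      omega
  | cons c cs' ih =>
    intro hcs rem out hr
    have hc : c.toNat < 256 := hcs c (by simp)
    have hcs' : ∀ x ∈ cs', x.toNat < 256 := fun x hx => hcs x (by simp [hx])
    simp only [List.foldl_cons, List.flatMap_cons]
    set L := rem ++ pvBits 8 c.toNat with hL
    have hLlen : L.length = rem.length + 8 := by simp [hL, pvBits_length]
    have hLval : pvBinVal L = pvBinVal rem * 2 ^ 8 + c.toNat := by
      rw [hL, pvBinVal_append, pvBits_length,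
        pvBits_val 8 c.toNat (by rw [show (2 : Nat) ^ 8 = 256 from by norm_num]; exact hc)]
    have hacc : (pvBinVal rem <<< 8) + c.toNat = pvBinVal L := by
      rw [Nat.shiftLeft_eq, hLval]
    by_cases h5 : 13 ≤ rem.length + 8
    · have h13 : 13 ≤ L.length := by omega
      obtain ⟨hdiv, hmod⟩ := pvSplit13 L h13
      have hstep : pvStep (pvBinVal rem, rem.length, out) c =
          (pvBinVal (L.drop 13), (L.drop 13).length,
            out ++ pvEmitB (pvBinVal (L.take 13))) := by
        show pvDrain (rem.length + 8) ((pvBinVal rem <<< 8) + c.toNat) (rem.length + 8) out = _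
        rw [hacc, show pvDrain (rem.length + 8) (pvBinVal L) (rem.length + 8) out
            = pvDrain ((rem.length + 7) + 1) (pvBinVal L) ((rem.length + 7) + 1) out from rfl,
          pvDrain_pos _ _ _ _ (by omega), pvDrain_neg _ _ _ _ (by omega)]
        simp only [Nat.one_shiftLeft]
        have hexp : (rem.length + 7) + 1 - 13 = L.length - 13 := by omega
        rw [hexp, hdiv, hmod, show L.length - 13 = (L.drop 13).length from by simp]
      rw [hstep]
      have hlen13 : (L.drop 13).length < 13 := by simp only [List.length_drop]; omega
      rw [ih hcs' (L.drop 13) (out ++ pvEmitB (pvBinVal (L.take 13))) hlen13]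
      rw [← List.append_assoc, ← hL, pvPad_cut L _ h13]
      have hv13 : pvBinVal (L.take 13) < 8192 := by
        have h1 := pvBinVal_lt (L.take 13)
        have h2 : (L.take 13).length = 13 := by simp only [List.length_take]; omega
        rw [h2] at h1
        have h4 : (2 : Nat) ^ 13 = 8192 := by norm_num
        omega
      rw [pvEmit_eq _ hv13, String.append_assoc]
    · have hstep : pvStep (pvBinVal rem, rem.length, out) c = (pvBinVal L, L.length, out) := by
        show pvDrain (rem.length + 8) ((pvBinVal rem <<< 8) + c.toNat) (rem.length + 8) out = _
        rw [hacc, pvDrain_neg _ _ _ _ h5, hLlen]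
      rw [hstep, ih hcs' L out (by omega)]
      rw [← List.append_assoc, ← hL]

-- ===== VERDICT (by name: the statement is the Claim_ definition above) =====
theorem encode_base91_spec : Claim_equal_encode_base91 := by
  intro s hdom
  unfold Spec_encode_base91
  have hcs : ∀ c ∈ s.toList, c.toNat < 256 := by
    intro c hc
    have hall : pvDomStr s = true := hdom
    unfold pvDomStr at hall
    have hc2 := List.all_eq_true.mp hall c hc
    simp [pvDomChar] at hc2
    omega
  have hA : encode_base91 s = pvChunks (pvPad 13 (s.toList.flatMap fun c => pvBits 8 c.toNat)) := by
    show pvLoopA ((pvPad 13 (s.toList.flatMap fun c => pvBits 8 c.toNat)).length + 1)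
        (pvPad 13 (s.toList.flatMap fun c => pvBits 8 c.toNat)) 0 "" = _
    rw [pvLoopA_eq _ _ _ _ (by omega), List.drop_zero, String.empty_append]
  have hB : encode_base91_alt s = pvChunks (pvPad 13 (s.toList.flatMap fun c => pvBits 8 c.toNat)) := by
    have h := pvFold_inv s.toList hcs [] "" (by norm_num)
    rw [List.nil_append, String.empty_append] at h
    exact h
  rw [hA, hB]
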